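-- pv_equiv track=rewrite | github.com/LeonarddeR/unicodebrailleinput | addon/GlobalPlugins/unicodeBrailleInput/__init__.py | dots2uni
-- ===== SOURCE A (Python) =====
-- def dots2uni(cells):
--     """ Convert a braille to Unicode
-- 	@param cells the braille cellules (I.E. 13457-12367-1457-17)
-- 	@return the result in Unicode (NVDA in our example)
-- 	"""
--     cells = cells.strip().split('-')
--     out = []
--     for cell in cells:
--         val = 0x2800
--         if '1' in cell: val |= 1
--         if '2' in cell: val |= 2
--         if '3' in cell: val |= 4
--         if '4' in cell: val |= 8
--         if '5' in cell: val |= 0x10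
--         if '6' in cell: val |= 0x20
--         if '7' in cell: val |= 0x40
--         if '8' in cell: val |= 0x80
--         out.append(chr(val))
--     return "".join(out)
-- ===== SOURCE B (Python) =====
-- _BITS = {'1': 1, '2': 2, '3': 4, '4': 8, '5': 0x10, '6': 0x20, '7': 0x40, '8': 0x80}
--
-- def dots2uni(cells):
--     out = []
--     for cell in cells.strip().split('-'):
--         val = 0x2800
--         for c in cell:
--             val |= _BITS.get(c, 0)
--         out.append(chr(val))
--     return "".join(out)
-- ===== Notes on version B (the rewrite author's own statement) =====
-- stated objective: simpler
-- what changed: Replaces the eight per-cell substring membership tests with a single pass over the cell's characters, OR-ing in each digit's bit from a lookup table and silently skipping unknown characters.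
import Mathlib
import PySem

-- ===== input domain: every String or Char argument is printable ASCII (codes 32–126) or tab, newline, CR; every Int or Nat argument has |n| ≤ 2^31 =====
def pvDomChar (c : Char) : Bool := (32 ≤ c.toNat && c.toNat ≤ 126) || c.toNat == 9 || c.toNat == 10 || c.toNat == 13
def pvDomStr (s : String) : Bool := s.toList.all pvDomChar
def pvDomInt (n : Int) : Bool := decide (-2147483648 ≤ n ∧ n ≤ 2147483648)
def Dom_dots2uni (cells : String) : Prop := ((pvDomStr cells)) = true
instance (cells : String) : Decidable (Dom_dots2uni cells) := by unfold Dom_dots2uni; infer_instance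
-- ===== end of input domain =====

-- B replaces A's eight per-cell substring membership tests by a single pass over the cell's
-- characters, OR-ing in each digit's bit from a lookup table (objective: simpler).

-- ===== PORT A =====
-- '1' in cell (a single-character needle) is exactly character membership in the cell's char list;
-- val |= b is a let-rebinding; chr(val) is Char.ofNat (val always lies in 0x2800..0x28FF, a valid scalar).
def dots2uniCellA (cell : List Char) : Nat :=
  let val : Nat := 0x2800
  let val := if '1' ∈ cell then val ||| 1 else val
  let val := if '2' ∈ cell then val ||| 2 else val
  let val := if '3' ∈ cell then val ||| 4 else val
  let val := if '4' ∈ cell then val ||| 8 else val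
  let val := if '5' ∈ cell then val ||| 0x10 else val
  let val := if '6' ∈ cell then val ||| 0x20 else val
  let val := if '7' ∈ cell then val ||| 0x40 else val
  let val := if '8' ∈ cell then val ||| 0x80 else val
  val

-- cells.strip().split('-'): split? is none only for sep = "", so .getD [] never fires for sep "-".
def dots2uni (cells : String) : String :=
  String.ofList (((PySem.Str.split? (PySem.Str.strip cells) "-").getD []).map
    (fun cell => Char.ofNat (dots2uniCellA cell.toList)))

-- ===== PORT B =====
-- _BITS.get(c, 0): the literal dict lookup with default 0, ported as a total lookup function (exact).
def dotBit (c : Char) : Nat :=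
  if c = '1' then 1 else if c = '2' then 2 else if c = '3' then 4 else if c = '4' then 8
  else if c = '5' then 0x10 else if c = '6' then 0x20 else if c = '7' then 0x40
  else if c = '8' then 0x80 else 0

def dots2uni_alt (cells : String) : String :=
  String.ofList (((PySem.Str.split? (PySem.Str.strip cells) "-").getD []).map
    (fun cell => Char.ofNat (cell.toList.foldl (fun v c => v ||| dotBit c) 0x2800)))

-- ===== PRECONDITION & SPEC =====
def Spec_dots2uni (cells : String) (out : String) : Prop := out = dots2uni_alt cells
instance (cells : String) (out : String) : Decidable (Spec_dots2uni cells out) := by unfold Spec_dots2uni; infer_instance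

-- ===== CLAIM (what is proved, stated in full; the proofs are below) =====
def Claim_equal_dots2uni : Prop := ∀ (cells : String), Dom_dots2uni cells → Spec_dots2uni cells (dots2uni cells)

-- ===== LEMMAS AND PROOFS =====

-- one membership test of A, as a function of the accumulator
def step (d : Char) (b : Nat) (cell : List Char) (v : Nat) : Nat :=
  if d ∈ cell then v ||| b else v

-- A's eight-test chain, with an arbitrary starting accumulator
def chainFrom (v : Nat) (cell : List Char) : Nat :=
  step '8' 0x80 cell (step '7' 0x40 cell (step '6' 0x20 cell (step '5' 0x10 cell
    (step '4' 8 cell (step '3' 4 cell (step '2' 2 cell (step '1' 1 cell v)))))))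

theorem cellA_eq_chainFrom (cell : List Char) : dots2uniCellA cell = chainFrom 0x2800 cell := rfl

theorem step_cons_ne {d c : Char} (b : Nat) (l : List Char) (v : Nat) (h : d ≠ c) :
    step d b (c :: l) v = step d b l v := by simp [step, h]

theorem step_cons_self (d : Char) (b : Nat) (l : List Char) (v : Nat) :
    step d b (d :: l) v = step d b l (v ||| b) := by simp [step]

theorem step_or (d : Char) (b : Nat) (l : List Char) (v w : Nat) :
    step d b l (v ||| w) = step d b l v ||| w := by
  unfold step; split_ifs with h
  · rw [Nat.or_assoc, Nat.or_assoc, Nat.or_comm w b]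
  · rfl

theorem chainFrom_cons (v : Nat) (c : Char) (l : List Char) :
    chainFrom v (c :: l) = chainFrom (v ||| dotBit c) l := by
  by_cases h1 : c = '1'
  · subst h1; simp [chainFrom, dotBit, step_cons_self, step_cons_ne, step_or]
  by_cases h2 : c = '2'
  · subst h2; simp [chainFrom, dotBit, step_cons_self, step_cons_ne, step_or]
  by_cases h3 : c = '3'
  · subst h3; simp [chainFrom, dotBit, step_cons_self, step_cons_ne, step_or]
  by_cases h4 : c = '4'
  · subst h4; simp [chainFrom, dotBit, step_cons_self, step_cons_ne, step_or]
  by_cases h5 : c = '5'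
  · subst h5; simp [chainFrom, dotBit, step_cons_self, step_cons_ne, step_or]
  by_cases h6 : c = '6'
  · subst h6; simp [chainFrom, dotBit, step_cons_self, step_cons_ne, step_or]
  by_cases h7 : c = '7'
  · subst h7; simp [chainFrom, dotBit, step_cons_self, step_cons_ne, step_or]
  by_cases h8 : c = '8'
  · subst h8; simp [chainFrom, dotBit, step_cons_self, step_cons_ne, step_or]
  have H1 := Ne.symm h1; have H2 := Ne.symm h2; have H3 := Ne.symm h3; have H4 := Ne.symm h4
  have H5 := Ne.symm h5; have H6 := Ne.symm h6; have H7 := Ne.symm h7; have H8 := Ne.symm h8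
  simp [chainFrom, dotBit, h1, h2, h3, h4, h5, h6, h7, h8,
    step_cons_ne _ _ _ H1, step_cons_ne _ _ _ H2, step_cons_ne _ _ _ H3, step_cons_ne _ _ _ H4,
    step_cons_ne _ _ _ H5, step_cons_ne _ _ _ H6, step_cons_ne _ _ _ H7, step_cons_ne _ _ _ H8]

theorem foldl_eq_chainFrom (l : List Char) : ∀ v : Nat,
    l.foldl (fun v c => v ||| dotBit c) v = chainFrom v l := by
  induction l with
  | nil => intro v; simp [chainFrom, step]
  | cons c l ih => intro v; rw [List.foldl_cons, ih, chainFrom_cons]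

-- ===== VERDICT (by name: the statement is the Claim_ definition above) =====
theorem dots2uni_spec : Claim_equal_dots2uni := by
  intro cells _
  show dots2uni cells = dots2uni_alt cells
  rw [dots2uni, dots2uni_alt]
  exact congrArg String.ofList (List.map_congr_left fun cell _ =>
    congrArg Char.ofNat ((cellA_eq_chainFrom cell.toList).trans (foldl_eq_chainFrom cell.toList _).symm))
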